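-- pv_equiv track=rewrite | github.com/anupyadav27/lg-protect | inventory/testing/utility/utility_testing.py | create_service_region_mapping
-- ===== SOURCE A (Python) =====
-- def create_service_region_mapping(aws_services_by_region):
--     """Create a mapping of service to list of regions where it's available"""
--     service_regions = {}
--
--     for region, services in aws_services_by_region.items():
--         for service in services:
--             if service not in service_regions:
--                 service_regions[service] = []
--             service_regions[service].append(region)
--
--     # Sort regions for each service for consistency
--     for service in service_regions:
--         service_regions[service].sort()
--
--     return service_regions
-- ===== SOURCE B (Python) =====
-- def _insort(regions, region):
--     # return a copy of the sorted list `regions` with `region` inserted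
--     # after any equal elements, keeping the list sorted
--     i = 0
--     while i < len(regions) and regions[i] <= region:
--         i += 1
--     return regions[:i] + [region] + regions[i:]
--
--
-- def create_service_region_mapping(aws_services_by_region):
--     """Create a mapping of service to list of regions where it's available"""
--     service_regions = {}
--     for region, services in aws_services_by_region.items():
--         for service in services:
--             service_regions[service] = _insort(service_regions.get(service, []), region)
--     return service_regions
-- ===== Notes on version B (the rewrite author's own statement) =====
-- stated objective: alternative
-- what changed: B keeps each service's region list sorted at all times by inserting every region at its final position as it is encountered (online insertion), eliminating A's separate per-service sort pass at the end.
import Mathlib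
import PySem

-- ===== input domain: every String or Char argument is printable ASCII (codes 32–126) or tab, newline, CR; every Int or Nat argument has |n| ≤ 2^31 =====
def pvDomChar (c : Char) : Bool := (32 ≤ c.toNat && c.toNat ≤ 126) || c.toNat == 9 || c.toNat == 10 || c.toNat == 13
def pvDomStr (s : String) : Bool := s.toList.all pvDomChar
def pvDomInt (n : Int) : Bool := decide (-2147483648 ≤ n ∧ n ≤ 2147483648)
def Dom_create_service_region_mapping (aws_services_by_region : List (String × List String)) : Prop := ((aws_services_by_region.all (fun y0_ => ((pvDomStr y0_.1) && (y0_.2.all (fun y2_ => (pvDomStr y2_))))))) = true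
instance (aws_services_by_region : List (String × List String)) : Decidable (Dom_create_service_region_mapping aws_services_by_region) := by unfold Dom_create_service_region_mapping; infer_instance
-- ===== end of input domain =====

-- B replaces A's build-then-sort (append each region, then sort every list in a second pass)
-- by an online insertion that keeps each service's region list sorted at all times (objective: alternative).


-- ===== PORT A =====
def create_service_region_mapping (aws_services_by_region : List (String × List String)) : List (String × List String) :=
  -- service_regions = {} ; for region, services in …: for service in services: …
  let service_regions : PySem.Dict String (List String) :=
    aws_services_by_region.foldl (fun d p =>
      p.2.foldl (fun d service =>
        -- if service not in service_regions: service_regions[service] = []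
        let d := if d.contains service then d else d.insert service ([] : List String)
        -- service_regions[service].append(region)
        d.modify service [] (fun l => l ++ [p.1])) d) PySem.Dict.empty
  -- for service in service_regions: service_regions[service].sort()
  (service_regions.keys.foldl (fun d service =>
      d.modify service [] (fun l => PySem.List.sorted l (fun x => x))) service_regions).items

-- ===== PORT B =====
-- _insort: index scan 'while i < len(regions) and regions[i] <= region: i += 1' …
def insortIdx (region : String) : List String → Nat
  | [] => 0
  | y :: ys => if y ≤ region then insortIdx region ys + 1 else 0

-- … then 'regions[:i] + [region] + regions[i:]' (i is in range, so take/drop are the exact slices)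
def insortStr (region : String) (regions : List String) : List String :=
  regions.take (insortIdx region regions) ++ [region] ++ regions.drop (insortIdx region regions)

def create_service_region_mapping_alt (aws_services_by_region : List (String × List String)) : List (String × List String) :=
  (aws_services_by_region.foldl (fun d p =>
    p.2.foldl (fun d service =>
      -- service_regions[service] = _insort(service_regions.get(service, []), region)
      d.modify service [] (fun l => insortStr p.1 l)) d) PySem.Dict.empty).items

-- ===== PRECONDITION & SPEC =====
def Spec_create_service_region_mapping (aws_services_by_region : List (String × List String)) (out : List (String × List String)) : Prop := out = create_service_region_mapping_alt aws_services_by_region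
instance (aws_services_by_region : List (String × List String)) (out : List (String × List String)) : Decidable (Spec_create_service_region_mapping aws_services_by_region out) := by unfold Spec_create_service_region_mapping; infer_instance

-- ===== CLAIM (what is proved, stated in full; the proofs are below) =====
def Claim_equal_create_service_region_mapping : Prop := ∀ (aws_services_by_region : List (String × List String)), Dom_create_service_region_mapping aws_services_by_region → Spec_create_service_region_mapping aws_services_by_region (create_service_region_mapping aws_services_by_region)

-- ===== LEMMAS AND PROOFS =====

-- B's scan-and-splice insert is PySem's insertBy (insert before the first strictly larger element)
theorem insortStr_eq_insertBy (x : String) (l : List String) :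
    insortStr x l = PySem.List.insertBy (fun a b => decide (a < b)) x l := by
  induction l with
  | nil => rfl
  | cons y ys ih =>
    by_cases h : y ≤ x
    · simp [insortStr, insortIdx, PySem.List.insertBy, h, not_lt.mpr h] at ih ⊢
      exact ih
    · simp [insortStr, insortIdx, PySem.List.insertBy, h, lt_of_not_ge h]

-- A's "if absent insert []; then append" step is a single modify-with-default step (as dicts)
theorem stepA_eq (d : PySem.Dict String (List String)) (s r : String) :
    ((if d.contains s then d else d.insert s ([] : List String)).modify s [] (fun l => l ++ [r]))
      = d.modify s [] (fun l => l ++ [r]) := by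
  by_cases h : d.contains s = true
  · simp [h]
  · have hc : d.contains s = false := by simpa using h
    simp [h, PySem.Dict.modify, PySem.Dict.getD_insert_self, PySem.Dict.insert_insert_self,
      PySem.Dict.getD_of_not_contains d ([] : List String) hc]

-- lookup after a modify-with-default-[] loop: g folded over the matching seconds
theorem getD_foldl_modify_g (g : String → List String → List String)
    (l : List (String × String)) (d : PySem.Dict String (List String)) (c : String) :
    (l.foldl (fun d p => d.modify p.1 [] (g p.2)) d).getD c []
      = ((l.filter (fun p => p.1 == c)).map (fun p => p.2)).foldl (fun acc r => g r acc) (d.getD c []) := by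
  induction l generalizing d with
  | nil => rfl
  | cons p t ih =>
    by_cases h : p.1 = c
    · subst h
      simp [List.foldl_cons, ih, PySem.Dict.getD_modify_self]
    · simp only [List.foldl_cons, ih,
        PySem.Dict.getD_modify_of_ne _ _ _ (fun e => h e.symm), List.filter_cons]
      simp [h]

-- keys not visited by the sort pass keep their value
theorem getD_foldl_modify_sort_not_mem (t : List String) (d : PySem.Dict String (List String))
    (c : String) (hct : c ∉ t) :
    (t.foldl (fun d k => d.modify k [] (fun l => PySem.List.sorted l (fun x => x))) d).getD c []
      = d.getD c [] := by
  induction t generalizing d with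
  | nil => rfl
  | cons k' t' ih =>
    simp only [List.foldl_cons]
    rw [ih _ (fun hy => hct (List.mem_cons_of_mem k' hy)),
      PySem.Dict.getD_modify_of_ne _ _ _ (fun e : c = k' => hct (e ▸ List.mem_cons_self))]

-- one in-place sort per distinct key
theorem getD_foldl_modify_sort (ks : List String) (hnd : ks.Nodup)
    (d : PySem.Dict String (List String)) (c : String) (hc : c ∈ ks) :
    (ks.foldl (fun d k => d.modify k [] (fun l => PySem.List.sorted l (fun x => x))) d).getD c []
      = PySem.List.sorted (d.getD c []) (fun x => x) := by
  induction ks generalizing d with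
  | nil => cases hc
  | cons k t ih =>
    rcases List.nodup_cons.mp hnd with ⟨hk, hndt⟩
    rcases List.mem_cons.mp hc with h | h
    · subst h
      simp only [List.foldl_cons]
      rw [getD_foldl_modify_sort_not_mem t _ _ hk, PySem.Dict.getD_modify_self]
    · have hck : c ≠ k := fun e => hk (e ▸ h)
      simp only [List.foldl_cons]
      rw [ih hndt _ h, PySem.Dict.getD_modify_of_ne _ _ _ hck]

-- Set.update adds nothing when every element is already present
theorem set_update_of_subset (s : PySem.Set String) (l : List String)
    (h : ∀ x ∈ l, x ∈ s) : PySem.Set.update s l = s := by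
  induction l generalizing s with
  | nil => rfl
  | cons x t ih =>
    have hx : PySem.Set.add s x = s := PySem.Set.add_of_mem (h x List.mem_cons_self)
    have ht := ih s (fun y hy => h y (List.mem_cons_of_mem _ hy))
    simpa [PySem.Set.update, hx] using ht

-- the two nested loops are one loop over the flattened (service, region) stream
theorem foldl_pairs (step : PySem.Dict String (List String) → String × String → PySem.Dict String (List String))
    (m : List (String × List String)) (d : PySem.Dict String (List String)) :
    m.foldl (fun d p => p.2.foldl (fun d s => step d (s, p.1)) d) d
      = (m.flatMap (fun p => p.2.map (fun s => (s, p.1)))).foldl step d := by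
  rw [List.foldl_flatMap]
  simp [List.foldl_map]

theorem main_eq (m : List (String × List String)) :
    create_service_region_mapping m = create_service_region_mapping_alt m := by
  unfold create_service_region_mapping create_service_region_mapping_alt
  have hstep : (fun (d : PySem.Dict String (List String)) (p : String × List String) =>
      p.2.foldl (fun d service =>
        (if d.contains service then d else d.insert service ([] : List String)).modify service []
          (fun l => l ++ [p.1])) d)
      = (fun d p => p.2.foldl (fun d service => d.modify service [] (fun l => l ++ [p.1])) d) := by
    funext d p
    exact PySem.List.foldl_congr_mem _ _ _ _ (fun acc s _ => stepA_eq acc s p.1)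
  rw [hstep, foldl_pairs (fun d q => d.modify q.1 [] (fun l => l ++ [q.2])),
    foldl_pairs (fun d q => d.modify q.1 [] (fun l => insortStr q.2 l))]
  set ps := m.flatMap (fun p => p.2.map (fun s => (s, p.1))) with hps
  set dM := ps.foldl (fun d q => d.modify q.1 [] (fun l => l ++ [q.2])) PySem.Dict.empty with hdM
  set dB := ps.foldl (fun d q => d.modify q.1 [] (fun l => insortStr q.2 l)) PySem.Dict.empty with hdB
  -- keys of both builds agree
  have hkM : dM.keys = PySem.Set.update (PySem.Dict.empty : PySem.Dict String (List String)).keys (ps.map (fun q => q.1)) := by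
    rw [hdM]; exact PySem.Dict.keys_foldl_modify_key ps (fun q => q.1) [] (fun _ q l => l ++ [q.2]) _
  have hkB : dB.keys = PySem.Set.update (PySem.Dict.empty : PySem.Dict String (List String)).keys (ps.map (fun q => q.1)) := by
    rw [hdB]; exact PySem.Dict.keys_foldl_modify_key ps (fun q => q.1) [] (fun _ q l => insortStr q.2 l) _
  have hkeys : dM.keys = dB.keys := hkM.trans hkB.symm
  have hndM : dM.keys.Nodup := by
    rw [hdM]
    exact PySem.Dict.nodup_keys_foldl_modify_key ps (fun q => q.1) [] (fun _ q l => l ++ [q.2]) _ PySem.Dict.nodup_keys_empty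
  have hndB : dB.keys.Nodup := hkeys ▸ hndM
  set dA := dM.keys.foldl (fun d k => d.modify k [] (fun l => PySem.List.sorted l (fun x => x))) dM with hdA
  have hkA : dA.keys = dM.keys := by
    rw [hdA, PySem.Dict.keys_foldl_modify_key dM.keys (fun k => k) [] (fun _ _ l => PySem.List.sorted l (fun x => x)) dM]
    simp only [List.map_id']
    exact set_update_of_subset _ _ (fun x hx => hx)
  have hndA : dA.keys.Nodup := hkA ▸ hndM
  -- items via keys
  rw [PySem.Dict.items_eq_map_keys dA hndA [], PySem.Dict.items_eq_map_keys dB hndB [], hkA, hkeys]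
  apply List.map_congr_left
  intro k hk
  have hkmem : k ∈ dM.keys := hkeys ▸ hk
  -- A side: the sort pass sorts the appended list
  have hAk : dA.getD k [] = PySem.List.sorted (dM.getD k []) (fun x => x) :=
    getD_foldl_modify_sort dM.keys hndM dM k hkmem
  -- the appended list is the filtered region stream
  have hMk : dM.getD k [] = ((ps.filter (fun q => q.1 == k)).map (fun q => q.2)) := by
    rw [hdM, getD_foldl_modify_g (fun r l => l ++ [r]) ps PySem.Dict.empty k,
      PySem.List.foldl_append_singleton]
    simp
  -- B side: folding insortStr over the same stream is sorting it
  have hBk : dB.getD k [] = PySem.List.sorted ((ps.filter (fun q => q.1 == k)).map (fun q => q.2)) (fun x => x) := by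
    rw [hdB, getD_foldl_modify_g insortStr ps PySem.Dict.empty k]
    rw [PySem.List.sorted_eq_foldl_insertBy]
    simp only [PySem.Dict.getD_empty]
    exact PySem.List.foldl_congr_mem _ _ _ _ (fun acc r _ => insortStr_eq_insertBy r acc)
  rw [hAk, hMk, hBk]

-- ===== VERDICT (by name: the statement is the Claim_ definition above) =====
theorem create_service_region_mapping_spec : Claim_equal_create_service_region_mapping := by
  intro m _
  unfold Spec_create_service_region_mapping
  exact main_eq m
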